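-- pv_equiv track=rewrite | github.com/Storm1108/MyPython | HomeWork/Hw3/Hw35.py | Fibbonachi
-- ===== SOURCE A (Python) =====
-- def Fibbonachi(n):
--     if n > 1:
--         fibb_list = [1, 0, 1]
--         for i in range(1, n):
--             fibb_list.insert(0, (((-1) ** i) * (fibb_list[-2] + fibb_list[-1])))
--             fibb_list.append(fibb_list[-2] + fibb_list[-1])
--         return fibb_list
--     else:
--         return [0]
-- ===== SOURCE B (Python) =====
-- def Fibbonachi(n):
--     if n <= 1:
--         return [0]
--     a = []
--     x, y = 0, 1
--     for _ in range(1, n):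
--         x, y = y, x + y
--         a.append(y)
--     front = [(-1) ** i * v for i, v in enumerate(a, 1)]
--     front.reverse()
--     return front + [1, 0, 1] + a
-- ===== Notes on version B (the rewrite author's own statement) =====
-- stated objective: alternative
-- what changed: A grows one list symmetrically by repeated insert(0,..)+append reading the last two elements each step; B runs a single forward loop maintaining only a rolling (x,y) Fibonacci pair to build the back half, derives the signed front half by an enumerate comprehension plus reverse, and assembles the result by concatenation.
import Mathlib
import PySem

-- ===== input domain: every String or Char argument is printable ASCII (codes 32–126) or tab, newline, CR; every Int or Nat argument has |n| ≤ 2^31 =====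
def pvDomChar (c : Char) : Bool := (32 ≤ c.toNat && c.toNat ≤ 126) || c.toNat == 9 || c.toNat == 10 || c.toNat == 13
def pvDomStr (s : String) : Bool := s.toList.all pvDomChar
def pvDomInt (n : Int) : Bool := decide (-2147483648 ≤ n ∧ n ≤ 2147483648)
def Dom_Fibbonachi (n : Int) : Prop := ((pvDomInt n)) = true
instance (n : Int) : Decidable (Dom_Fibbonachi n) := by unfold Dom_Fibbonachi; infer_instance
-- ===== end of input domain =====

-- B replaces A's symmetric insert(0,..)/append growth of one list by a single rolling-pair
-- Fibonacci loop plus concatenation of the signed reversed front, the core [1,0,1] and the back.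

-- ===== PORT A =====
-- loop body of A; the list always has ≥ 3 elements so the pyGetD defaults are never taken
def aStep (l : List Int) (i : Int) : List Int :=
  let l2 := PySem.List.insert l 0 ((-1) ^ i.toNat * (PySem.List.pyGetD l (-2) 0 + PySem.List.pyGetD l (-1) 0))
  l2 ++ [PySem.List.pyGetD l2 (-2) 0 + PySem.List.pyGetD l2 (-1) 0]

def Fibbonachi (n : Int) : List Int :=
  if n > 1 then
    (PySem.List.pyRange 1 n 1).foldl aStep [1, 0, 1]
  else [0]

-- ===== PORT B =====
-- loop body of B: x, y = y, x + y; a.append(y)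
def bStep (s : Int × Int × List Int) (_i : Int) : Int × Int × List Int :=
  (s.2.1, s.1 + s.2.1, s.2.2 ++ [s.1 + s.2.1])

def Fibbonachi_alt (n : Int) : List Int :=
  if n ≤ 1 then [0]
  else
    let s := (PySem.List.pyRange 1 n 1).foldl bStep (0, 1, [])
    let a := s.2.2
    let front := ((PySem.List.enumerate a 1).map (fun p => (-1) ^ p.1.toNat * p.2)).reverse
    front ++ [1, 0, 1] ++ a

-- ===== PRECONDITION & SPEC =====
def Spec_Fibbonachi (n : Int) (out : List Int) : Prop := out = Fibbonachi_alt n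
instance (n : Int) (out : List Int) : Decidable (Spec_Fibbonachi n out) := by unfold Spec_Fibbonachi; infer_instance

-- ===== CLAIM (what is proved, stated in full; the proofs are below) =====
def Claim_equal_Fibbonachi : Prop := ∀ (n : Int), Dom_Fibbonachi n → Spec_Fibbonachi n (Fibbonachi n)

-- ===== LEMMAS AND PROOFS =====

-- Fibonacci numbers over Int
def F : Nat → Int
  | 0 => 0
  | 1 => 1
  | (k+2) => F k + F (k+1)

-- the back half appended during the loops: [F 2, …, F (t+1)]
def fibs (t : Nat) : List Int := (List.range t).map (fun j => F (j+2))

-- the signed front values in generation order: [(-1)^(j+1) * F (j+2) for j < t]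
def sgn (t : Nat) : List Int := (List.range t).map (fun j => (-1) ^ (j+1) * F (j+2))

lemma fibs_succ (t : Nat) : fibs (t+1) = fibs t ++ [F (t+2)] := by
  simp [fibs, List.range_succ]

lemma sgn_succ (t : Nat) : sgn (t+1) = sgn t ++ [(-1) ^ (t+1) * F (t+2)] := by
  simp [sgn, List.range_succ]

lemma length_fibs (t : Nat) : (fibs t).length = t := by simp [fibs]

-- the tail of A's list: 0 :: 1 :: fibs t always ends in [F t, F (t+1)]
lemma tail_decomp : ∀ t : Nat, ∃ pre : List Int, 0 :: 1 :: fibs t = pre ++ [F t, F (t+1)]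
  | 0 => ⟨[], by simp [fibs, F]⟩
  | (t+1) => by
    obtain ⟨pre, hp⟩ := tail_decomp t
    refine ⟨pre ++ [F t], ?_⟩
    rw [fibs_succ,
      show (0 : Int) :: 1 :: (fibs t ++ [F (t+2)]) = (0 :: 1 :: fibs t) ++ [F (t+2)] by simp, hp]
    have hF : F (t+2) = F t + F (t+1) := rfl
    rw [hF]
    simp

lemma pyGetD_neg2_append (l : List Int) (a b : Int) :
    PySem.List.pyGetD (l ++ [a, b]) (-2) 0 = a := by
  rw [PySem.List.pyGetD_neg_ofNat (l ++ [a, b]) 2 0 (by omega) (by simp)]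
  simp

lemma pyGetD_neg1_append (l : List Int) (a b : Int) :
    PySem.List.pyGetD (l ++ [a, b]) (-1) 0 = b := by
  rw [show l ++ [a, b] = (l ++ [a]) ++ [b] by simp]
  exact PySem.List.pyGetD_neg_one_append_singleton _ _ _

-- A's loop invariant
lemma A_inv : ∀ t : Nat,
    (PySem.List.pyRange 1 (1 + (t : Int)) 1).foldl aStep [1, 0, 1]
      = (sgn t).reverse ++ 1 :: 0 :: 1 :: fibs t
  | 0 => by simp [PySem.List.pyRange_one_eq_nil, sgn, fibs]
  | (t+1) => by
    have hr : PySem.List.pyRange 1 (1 + ((t+1 : Nat) : Int)) 1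
        = PySem.List.pyRange 1 (1 + (t : Int)) 1 ++ [1 + (t : Int)] := by
      have := PySem.List.pyRange_one_succ_right (a := 1) (b := 1 + (t : Int)) (by omega)
      rw [show (1 + ((t+1 : Nat) : Int)) = (1 + (t : Int)) + 1 by push_cast; ring]
      exact this
    rw [hr, List.foldl_append, A_inv t]
    obtain ⟨pre, hp⟩ := tail_decomp t
    have hL : (sgn t).reverse ++ 1 :: 0 :: 1 :: fibs t
        = ((sgn t).reverse ++ 1 :: pre) ++ [F t, F (t+1)] := by
      rw [show (1 : Int) :: 0 :: 1 :: fibs t = 1 :: (0 :: 1 :: fibs t) from rfl, hp]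
      simp
    simp only [List.foldl_cons, List.foldl_nil, aStep, PySem.List.insert_zero]
    rw [hL, pyGetD_neg2_append, pyGetD_neg1_append]
    rw [show ((-1 : Int) ^ (1 + (t : Int)).toNat * (F t + F (t+1))) :: (((sgn t).reverse ++ 1 :: pre) ++ [F t, F (t+1)])
        = ((((-1 : Int) ^ (1 + (t : Int)).toNat * (F t + F (t+1))) :: ((sgn t).reverse ++ 1 :: pre)) ++ [F t, F (t+1)]) by simp]
    rw [pyGetD_neg2_append, pyGetD_neg1_append]
    have htn : (1 + (t : Int)).toNat = t + 1 := by omega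
    have hF : F t + F (t+1) = F (t+2) := by simp [F]
    rw [htn, hF, sgn_succ, fibs_succ, List.reverse_append]
    simp only [List.reverse_cons, List.reverse_nil, List.nil_append,
      List.cons_append, List.append_assoc]
    rw [show pre ++ [F t, F (t+1), F (t+2)] = pre ++ [F t, F (t+1)] ++ [F (t+2)] by simp, ← hp]
    simp
  termination_by t => t

-- B's loop invariant: the state after t steps is (F t, F (t+1), fibs t)
lemma B_inv : ∀ t : Nat,
    (PySem.List.pyRange 1 (1 + (t : Int)) 1).foldl bStep (0, 1, [])
      = (F t, F (t+1), fibs t)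
  | 0 => by simp [PySem.List.pyRange_one_eq_nil, fibs, F]
  | (t+1) => by
    have hr : PySem.List.pyRange 1 (1 + ((t+1 : Nat) : Int)) 1
        = PySem.List.pyRange 1 (1 + (t : Int)) 1 ++ [1 + (t : Int)] := by
      have := PySem.List.pyRange_one_succ_right (a := 1) (b := 1 + (t : Int)) (by omega)
      rw [show (1 + ((t+1 : Nat) : Int)) = (1 + (t : Int)) + 1 by push_cast; ring]
      exact this
    rw [hr, List.foldl_append, B_inv t]
    simp only [List.foldl_cons, List.foldl_nil, bStep]
    rw [fibs_succ]
    have hF : F t + F (t+1) = F (t+2) := by simp [F]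
    simp [hF]
  termination_by t => t

-- B's front comprehension produces sgn t
lemma B_front : ∀ t : Nat,
    (PySem.List.enumerate (fibs t) 1).map (fun p => (-1 : Int) ^ p.1.toNat * p.2) = sgn t
  | 0 => by simp [fibs, sgn, PySem.List.enumerate_nil]
  | (t+1) => by
    rw [fibs_succ, PySem.List.enumerate_append, List.map_append, B_front t, sgn_succ]
    simp only [PySem.List.enumerate_cons, PySem.List.enumerate_nil, List.map_cons, List.map_nil,
      length_fibs]
    rw [show ((1 : Int) + (t : Nat)).toNat = t + 1 by omega]
  termination_by t => t

-- ===== VERDICT (by name: the statement is the Claim_ definition above) =====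
theorem Fibbonachi_spec : Claim_equal_Fibbonachi := by
  intro n _
  unfold Spec_Fibbonachi Fibbonachi Fibbonachi_alt
  by_cases h : n > 1
  · have ht : n = 1 + ((n - 1).toNat : Int) := by omega
    rw [if_pos h, if_neg (by omega)]
    rw [ht, A_inv, B_inv]
    simp only []
    rw [B_front]
    simp
  · rw [if_neg h, if_pos (by omega)]
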